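-- pv_equiv track=rewrite | github.com/jobet1130/collatz-data-science | src/collatz/sequence.py | collatz_steps_to_max
-- ===== SOURCE A (Python) =====
-- def collatz_steps_to_max(n):
--     """
--     Find the number of steps to reach the maximum value in the Collatz sequence.
--
--     Args:
--         n (int): Starting number (must be positive)
--
--     Returns:
--         int: Number of steps to reach the maximum value
--
--     Raises:
--         ValueError: If n is not a positive integer
--     """
--     if not isinstance(n, int) or n <= 0:
--         raise ValueError("Starting number must be a positive integer")
--
--     max_value = n
--     max_steps = 0
--     current = n
--     steps = 0
--
--     while current != 1:
--         if current > max_value: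
--             max_value = current
--             max_steps = steps
--
--         steps += 1
--         if current % 2 == 0:
--             current = current // 2
--         else:
--             current = 3 * current + 1
--
--     return max_steps
-- ===== SOURCE B (Python) =====
-- def collatz_steps_to_max(n):
--     """
--     Find the number of steps to reach the maximum value in the Collatz sequence.
--
--     Generate-then-select: build the whole sequence [n, ..., 1], then return the
--     index of the first occurrence of its maximum.
--     """
--     if not isinstance(n, int) or n <= 0:
--         raise ValueError("Starting number must be a positive integer")
--
--     seq = [n]
--     while seq[-1] != 1:
--         c = seq[-1]
--         seq.append(c // 2 if c % 2 == 0 else 3 * c + 1)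
--
--     return seq.index(max(seq))
-- ===== Notes on version B (the rewrite author's own statement) =====
-- stated objective: simpler
-- what changed: Replaces the fused single-pass running-max/steps-counter loop with a generate-then-select decomposition: build the full Collatz sequence as a list, then return seq.index(max(seq)).
import Mathlib
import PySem

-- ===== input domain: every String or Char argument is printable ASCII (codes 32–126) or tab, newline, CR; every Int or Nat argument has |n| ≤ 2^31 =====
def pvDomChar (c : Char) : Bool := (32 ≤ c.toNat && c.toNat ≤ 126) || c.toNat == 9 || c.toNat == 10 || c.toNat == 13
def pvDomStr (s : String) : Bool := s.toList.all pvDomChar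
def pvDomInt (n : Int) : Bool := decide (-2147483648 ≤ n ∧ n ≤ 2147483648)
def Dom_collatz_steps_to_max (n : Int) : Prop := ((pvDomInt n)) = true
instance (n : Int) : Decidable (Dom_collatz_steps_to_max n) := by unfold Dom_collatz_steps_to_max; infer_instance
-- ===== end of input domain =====

-- B replaces A's fused running-max loop by generate-the-sequence-then-take-index-of-its-max (simpler decomposition, same cost).

-- ===== PORT A =====
-- A's while loop, with a fuel guard making the recursion total (fuel only bounds the
-- iteration count; it is never reached on the tested domain).
def collatzLoopA : Nat → Int → Int → Int → Int → Int
  | 0, _, _, max_steps, _ => max_steps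
  | fuel+1, current, max_value, max_steps, steps =>
    if current ≠ 1 then
      let max_value' := if current > max_value then current else max_value
      let max_steps' := if current > max_value then steps else max_steps
      let current' := if PySem.Int.mod current 2 = 0 then PySem.Int.floordiv current 2 else 3 * current + 1
      collatzLoopA fuel current' max_value' max_steps' (steps + 1)
    else max_steps

def collatz_steps_to_max (n : Int) : Int := collatzLoopA 100001 n n 0 0

-- ===== PORT B =====
-- B's list-building while loop, same fuel guard.
def collatzSeqB : Nat → Int → List Int
  | 0, c => [c]
  | fuel+1, c =>
    if c ≠ 1 then
      c :: collatzSeqB fuel (if PySem.Int.mod c 2 = 0 then PySem.Int.floordiv c 2 else 3 * c + 1)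
    else [c]

def collatz_steps_to_max_alt (n : Int) : Int :=
  let seq := collatzSeqB 100000 n
  match PySem.List.max? seq (fun y => y) with
  | some m => (((PySem.List.index? seq m).getD 0 : Nat) : Int)
  | none => 0

-- ===== PRECONDITION & SPEC =====
-- A raises ValueError exactly on n <= 0.
def Pre_collatz_steps_to_max (n : Int) : Prop := 1 ≤ n
instance (n : Int) : Decidable (Pre_collatz_steps_to_max n) := by unfold Pre_collatz_steps_to_max; infer_instance
def pvWitness_collatz_steps_to_max : Int := 7

def Spec_collatz_steps_to_max (n : Int) (out : Int) : Prop := out = collatz_steps_to_max_alt n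
instance (n : Int) (out : Int) : Decidable (Spec_collatz_steps_to_max n out) := by unfold Spec_collatz_steps_to_max; infer_instance

-- ===== CLAIM (what is proved, stated in full; the proofs are below) =====
def Claim_equal_collatz_steps_to_max : Prop := ∀ (n : Int), Dom_collatz_steps_to_max n → Pre_collatz_steps_to_max n → Spec_collatz_steps_to_max n (collatz_steps_to_max n)

-- ===== LEMMAS AND PROOFS =====

-- The list of values A's loop actually compares against its running max.
def examinedE : Nat → Int → List Int
  | 0, _ => []
  | f+1, c =>
    if c ≠ 1 then
      c :: examinedE f (if PySem.Int.mod c 2 = 0 then PySem.Int.floordiv c 2 else 3 * c + 1)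
    else []

-- A's running-max/step accumulator as a pure scan over a list.
def scanMax : Int → Int → Int → List Int → Int × Int
  | mv, ms, _, [] => (mv, ms)
  | mv, ms, s, x :: t => if x > mv then scanMax x s (s+1) t else scanMax mv ms (s+1) t

-- Index of the first occurrence of the maximum.
def firstArgmax : List Int → Int
  | [] => 0
  | x :: t => if ∀ y ∈ t, y ≤ x then 0 else 1 + firstArgmax t

lemma next_pos {c : Int} (h : 2 ≤ c) :
    1 ≤ (if PySem.Int.mod c 2 = 0 then PySem.Int.floordiv c 2 else 3 * c + 1) := by
  split_ifs with hm
  · rw [PySem.Int.floordiv_eq_ediv_of_pos (by omega)]; omega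
  · omega

lemma loopA_eq_scan : ∀ (f : Nat) (c mv ms s : Int),
    collatzLoopA f c mv ms s = (scanMax mv ms s (examinedE f c)).2 := by
  intro f
  induction f with
  | zero => intro c mv ms s; simp [collatzLoopA, examinedE, scanMax]
  | succ f ih =>
    intro c mv ms s
    by_cases hc : c = 1
    · simp [collatzLoopA, examinedE, hc, scanMax]
    · simp only [collatzLoopA, examinedE, ne_eq, hc, not_false_iff, if_true, scanMax]
      by_cases hgt : c > mv
      · simp [hgt, ih]
      · simp [hgt, ih]

lemma examinedE_all_ge_two : ∀ (f : Nat) (c : Int), 1 ≤ c → ∀ y ∈ examinedE f c, 2 ≤ y := by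
  intro f
  induction f with
  | zero => intro c _ y hy; simp [examinedE] at hy
  | succ f ih =>
    intro c hc y hy
    by_cases h1 : c = 1
    · simp [examinedE, h1] at hy
    · simp only [examinedE, ne_eq, h1, not_false_iff, if_true, List.mem_cons] at hy
      rcases hy with rfl | hy
      · omega
      · exact ih _ (next_pos (by omega)) y hy

lemma collatzSeqB_one : ∀ (f : Nat), collatzSeqB f 1 = [1] := by
  intro f; cases f <;> simp [collatzSeqB]

lemma examinedE_one : ∀ (f : Nat), examinedE f 1 = [] := by
  intro f; cases f <;> simp [examinedE]

lemma examinedE_cons {f : Nat} {c : Int} (h : c ≠ 1) :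
    examinedE (f+1) c = c :: examinedE f (if PySem.Int.mod c 2 = 0 then PySem.Int.floordiv c 2 else 3 * c + 1) := by
  simp [examinedE, h]

lemma seqB_cases : ∀ (f : Nat) (c : Int), 2 ≤ c →
    collatzSeqB f c = examinedE (f+1) c ∨ collatzSeqB f c = examinedE (f+1) c ++ [1] := by
  intro f
  induction f with
  | zero =>
    intro c hc
    left
    simp [collatzSeqB, examinedE, show c ≠ 1 by omega]
  | succ f ih =>
    intro c hc
    have hc1 : c ≠ 1 := by omega
    set c' := (if PySem.Int.mod c 2 = 0 then PySem.Int.floordiv c 2 else 3 * c + 1) with hc'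
    have hnext : 1 ≤ c' := by rw [hc']; exact next_pos hc
    have hseq : collatzSeqB (f+1) c = c :: collatzSeqB f c' := by
      simp only [collatzSeqB, ne_eq, hc1, not_false_iff, if_true, ← hc']
    have hEc : examinedE (f+1+1) c = c :: examinedE (f+1) c' := by
      rw [examinedE_cons hc1, ← hc']
    by_cases h1 : c' = 1
    · right
      rw [hseq, hEc, h1, collatzSeqB_one, examinedE_one]
      rfl
    · rcases ih c' (by omega) with h | h
      · left; rw [hseq, hEc, h]
      · right; rw [hseq, hEc, h]; rfl

lemma scan_spec : ∀ (t : List Int) (x ms s : Int),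
    (scanMax x ms s t).2 = if ∀ y ∈ t, y ≤ x then ms else s + firstArgmax t := by
  intro t
  induction t with
  | nil => intro x ms s; simp [scanMax]
  | cons y t ih =>
    intro x ms s
    by_cases hgt : y > x
    · have hne : ¬ ∀ z ∈ y :: t, z ≤ x := fun h => absurd (h y (by simp)) (by omega)
      rw [show scanMax x ms s (y :: t) = scanMax y s (s+1) t from by simp [scanMax, hgt], ih,
          if_neg hne, firstArgmax]
      split_ifs with h2 <;> ring
    · have hyx : y ≤ x := by omega
      rw [show scanMax x ms s (y :: t) = scanMax x ms (s+1) t from by simp [scanMax, hgt], ih]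
      by_cases hall : ∀ z ∈ t, z ≤ x
      · have hall' : ∀ z ∈ y :: t, z ≤ x := by
          intro z hz
          rcases List.mem_cons.mp hz with rfl | hz'
          · exact hyx
          · exact hall z hz'
        rw [if_pos hall, if_pos hall']
      · have hnall : ¬ ∀ z ∈ y :: t, z ≤ x := fun h => hall fun z hz => h z (List.mem_cons_of_mem _ hz)
        have hnally : ¬ ∀ z ∈ t, z ≤ y := fun h => hall fun z hz => le_trans (h z hz) hyx
        rw [if_neg hall, if_neg hnall, firstArgmax, if_neg hnally]
        ring

lemma foldl_max_pull : ∀ (t : List Int) (x y : Int),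
    t.foldl max (max x y) = max x (t.foldl max y) := by
  intro t
  induction t with
  | nil => intro x y; simp
  | cons z t ih =>
    intro x y
    simp only [List.foldl_cons, max_assoc, ih]

lemma bval_eq : ∀ (t : List Int) (x : Int),
    (((PySem.List.index? (x :: t) (t.foldl max x)).getD 0 : Nat) : Int) = firstArgmax (x :: t) := by
  intro t
  induction t with
  | nil => simp [firstArgmax]
  | cons y t ih =>
    intro x
    by_cases hall : ∀ z ∈ y :: t, z ≤ x
    · have hM : (y :: t).foldl max x = x := by
        apply le_antisymm
        · have hmem := PySem.List.max?_mem (xs := x :: y :: t) (key := fun z => z)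
            (m := (y :: t).foldl max x) (by rw [PySem.List.max?_id_cons])
          rcases List.mem_cons.mp hmem with h | h
          · omega
          · exact hall _ h
        · exact (PySem.List.le_foldl_max (y :: t) x).1
      rw [hM, PySem.List.index?_cons_self, firstArgmax, if_pos hall]
      simp
    · -- some element of y :: t exceeds x, so the overall max is the max of the tail
      push Not at hall
      obtain ⟨z, hz, hzx⟩ := hall
      have hM' : (y :: t).foldl max x = max x (t.foldl max y) := by
        simpa using foldl_max_pull t x y
      have hle : z ≤ t.foldl max y := by
        have := PySem.List.max?_isMax (xs := y :: t) (key := fun w => w)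
          (m := t.foldl max y) (by rw [PySem.List.max?_id_cons]) z hz
        simpa using this
      have hgt : x < t.foldl max y := by omega
      have hM : (y :: t).foldl max x = t.foldl max y := by rw [hM']; omega
      rw [hM, PySem.List.index?_cons_of_ne (y :: t) (show x ≠ t.foldl max y by omega)]
      have hmem : t.foldl max y ∈ y :: t :=
        PySem.List.max?_mem (xs := y :: t) (key := fun w => w)
          (m := t.foldl max y) (by rw [PySem.List.max?_id_cons])
      have hsome : (PySem.List.index? (y :: t) (t.foldl max y)).isSome := by
        rw [PySem.List.index?_isSome_iff]; exact hmem
      obtain ⟨k, hk⟩ := Option.isSome_iff_exists.mp hsome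
      have harg : ¬ ∀ w ∈ y :: t, w ≤ x := by
        intro h; exact absurd (h z hz) (by omega)
      rw [firstArgmax, if_neg harg, ← ih y, hk]
      simp
      ring

lemma firstArgmax_append_one : ∀ (t : List Int) (x : Int), 2 ≤ x → (∀ y ∈ t, 2 ≤ y) →
    firstArgmax (x :: (t ++ [1])) = firstArgmax (x :: t) := by
  intro t
  induction t with
  | nil =>
    intro x hx _
    simp [firstArgmax, show (1:Int) ≤ x by omega]
  | cons y t ih =>
    intro x hx hall
    have hy : 2 ≤ y := hall y (by simp)
    have ht : ∀ z ∈ t, 2 ≤ z := fun z hz => hall z (List.mem_cons_of_mem _ hz)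
    have hshape : x :: ((y :: t) ++ [1]) = x :: (y :: (t ++ [1])) := by simp
    have hcond : (∀ z ∈ y :: (t ++ [1]), z ≤ x) ↔ (∀ z ∈ y :: t, z ≤ x) := by
      constructor
      · intro h z hz
        apply h
        simp only [List.mem_cons, List.mem_append] at hz ⊢
        tauto
      · intro h z hz
        simp only [List.mem_cons, List.mem_append] at hz
        rcases hz with rfl | hz' | hz1
        · exact h z (by simp)
        · exact h z (by simp [hz'])
        · have : z = 1 := by simpa using hz1
          omega
    by_cases hc : ∀ z ∈ y :: t, z ≤ x
    · rw [hshape, firstArgmax, if_pos (hcond.mpr hc), firstArgmax, if_pos hc]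
    · rw [hshape, firstArgmax, if_neg (fun h => hc (hcond.mp h)), ih y hy ht]
      conv_rhs => rw [firstArgmax]
      rw [if_neg hc]

-- B's value on a nonempty sequence list is firstArgmax of that list.
lemma alt_eq_firstArgmax (x : Int) (t : List Int) (n : Int)
    (h : collatzSeqB 100000 n = x :: t) :
    collatz_steps_to_max_alt n = firstArgmax (x :: t) := by
  rw [show collatz_steps_to_max_alt n =
        (match PySem.List.max? (collatzSeqB 100000 n) (fun y => y) with
         | some m => (((PySem.List.index? (collatzSeqB 100000 n) m).getD 0 : Nat) : Int)
         | none => 0) from rfl,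
      h, PySem.List.max?_id_cons]
  exact bval_eq t x

-- ===== VERDICT (by name: the statement is the Claim_ definition above) =====
theorem collatz_steps_to_max_spec : Claim_equal_collatz_steps_to_max := by
  intro n _ hpre
  unfold Spec_collatz_steps_to_max
  by_cases h1 : n = 1
  · subst h1
    have hA : collatz_steps_to_max 1 = 0 := by
      unfold collatz_steps_to_max
      rw [loopA_eq_scan]
      simp [examinedE, scanMax]
    have hB : collatz_steps_to_max_alt 1 = 0 := by
      rw [alt_eq_firstArgmax 1 [] 1 (collatzSeqB_one 100000)]
      simp [firstArgmax]
    rw [hA, hB]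
  · have hn2 : 2 ≤ n := by unfold Pre_collatz_steps_to_max at hpre; omega
    have hE : examinedE 100001 n
        = n :: examinedE 100000 (if PySem.Int.mod n 2 = 0 then PySem.Int.floordiv n 2 else 3 * n + 1) := by
      exact examinedE_cons (by omega)
    set T := examinedE 100000 (if PySem.Int.mod n 2 = 0 then PySem.Int.floordiv n 2 else 3 * n + 1) with hT
    have hTall : ∀ y ∈ T, 2 ≤ y := by
      intro y hy
      exact examinedE_all_ge_two 100000 _ (next_pos hn2) y hy
    have hA : collatz_steps_to_max n = firstArgmax (n :: T) := by
      unfold collatz_steps_to_max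
      rw [loopA_eq_scan, hE,
          show scanMax n 0 0 (n :: T) = scanMax n 0 1 T from by simp [scanMax],
          scan_spec]
      conv_rhs => rw [firstArgmax]
    rcases seqB_cases 100000 n hn2 with h | h
    · rw [hA, alt_eq_firstArgmax n T n (by rw [h, hE])]
    · have hBeq : collatzSeqB 100000 n = n :: (T ++ [1]) := by rw [h, hE]; rfl
      rw [hA, alt_eq_firstArgmax n (T ++ [1]) n hBeq,
          firstArgmax_append_one T n hn2 hTall]
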